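-- pv_equiv track=rewrite | github.com/puruadhikari/python-help-guide | matrix/find_word_location.py | find_word_bfs
-- ===== SOURCE A (Python) =====
-- from collections import deque
--
-- def find_word_bfs(matrix, word):
--     m = len(matrix)
--     n = len(matrix[0])
--     for i in range(m):
--         for j in range(n):
--             if matrix[i][j] == word[0]:
--                 queue = deque()
--                 queue.append((i, j, [(i, j)], 0))
--
--                 while queue:
--                     row, col, path, index = queue.popleft()
--                     if index == len(word) - 1:
--                         return path
--
--                     for dr, dc in [(0, 1), (1, 0), (0, -1), (-1, 0)]:
--                         nr, nc = row + dr, col + dc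
--                         if nr >= 0 and nr < m and nc >= 0 and nc < n and matrix[nr][nc] == word[index + 1]:
--                             #NOTE path + [(nr,nc)] creates a new list with a path
--                             queue.append((nr, nc, path + [(nr, nc)], index + 1))
--     return []
-- ===== SOURCE B (Python) =====
-- from collections import deque
--
-- def find_word_bfs(matrix, word):
--     m = len(matrix)
--     n = len(matrix[0])
--     L = len(word)
--     dirs = [(0, 1), (1, 0), (0, -1), (-1, 0)]
--
--     def grid(k, nxt):
--         # cells that carry word[k] and (if nxt is the table for k+1) have a good neighbour
--         return [[matrix[i][j] == word[k] and
--                  (nxt is None or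
--                   any(0 <= i + dr < m and 0 <= j + dc < n and nxt[i + dr][j + dc]
--                       for dr, dc in dirs))
--                  for j in range(n)] for i in range(m)]
--
--     # backward reachability: tables[k][i][j] == "word[k:] can be spelled starting at (i,j)"
--     tables = deque()
--     tables.appendleft(grid(L - 1, None))
--     for k in range(1, L):
--         tables.appendleft(grid(L - 1 - k, tables[0]))
--
--     # greedy reconstruction: first reachable start in row-major order,
--     # then always the first direction (in priority order) that stays reachable
--     for i in range(m):
--         for j in range(n):
--             if tables[0][i][j]:
--                 path = [(i, j)]
--                 r, c = i, j
--                 for k in range(1, L):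
--                     for dr, dc in dirs:
--                         nr, nc = r + dr, c + dc
--                         if 0 <= nr < m and 0 <= nc < n and tables[k][nr][nc]:
--                             r, c = nr, nc
--                             break
--                     path.append((r, c))
--                 return path
--     return []
-- ===== Notes on version B (the rewrite author's own statement) =====
-- stated objective: alternative
-- what changed: A's breadth-first search that carries whole paths through a queue (worst-case exponential on grids dense in the word's letters) is replaced by a backward reachability DP table over (position in word, cell) plus a greedy reconstruction taking the first direction (in A's priority order) that stays reachable, from the first reachable start in row-major order; this is polynomial in the worst case but always builds the L tables, so it is not claimed faster on typical inputs where the word is absent.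
-- outside the precondition, e.g. on find_word_bfs([['a', 'a'], ['b']], 'aa'): A returns [(0, 0), (0, 1)], B raises IndexError
import Mathlib
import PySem

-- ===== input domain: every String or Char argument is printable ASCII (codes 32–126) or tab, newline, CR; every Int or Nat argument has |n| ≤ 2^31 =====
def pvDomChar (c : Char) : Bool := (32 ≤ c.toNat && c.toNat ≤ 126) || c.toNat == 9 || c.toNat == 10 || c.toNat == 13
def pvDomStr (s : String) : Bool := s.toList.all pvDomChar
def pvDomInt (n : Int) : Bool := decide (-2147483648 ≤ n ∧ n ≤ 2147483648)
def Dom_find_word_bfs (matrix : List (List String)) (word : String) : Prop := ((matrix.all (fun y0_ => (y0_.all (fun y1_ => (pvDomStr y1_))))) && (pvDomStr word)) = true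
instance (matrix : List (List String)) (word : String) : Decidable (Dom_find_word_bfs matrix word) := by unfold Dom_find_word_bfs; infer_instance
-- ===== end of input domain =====

-- B replaces A's breadth-first search over whole queued paths by a backward reachability
-- table plus a greedy lexicographic path reconstruction (objective: alternative — polynomial
-- worst case where A's path queue can blow up, at the cost of always building the tables).


-- ===== PORT A =====
def pvDirs : List (Int × Int) := [(0, 1), (1, 0), (0, -1), (-1, 0)]

-- matrix[i][j] == word[k]  (word[k] a 1-char string; none = out of range, never equal)
def pvCellEq (s : String) (oc : Option Char) : Bool :=
  match oc with
  | some ch => s == String.ofList [ch]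
  | none => false

def pvCell (matrix : List (List String)) (i j : Nat) : String :=
  (matrix.getD i []).getD j ""

-- Python's "nr >= 0 and nr < m and nc >= 0 and nc < n"
def pvInB (m n : Nat) (a b : Int) : Bool :=
  decide (0 ≤ a) && decide (a < (m : Int)) && decide (0 ≤ b) && decide (b < (n : Int))

-- the neighbour nodes enqueued for one popped node (Python's inner for-loop over directions)
def pvExpand (matrix : List (List String)) (word : String) (m n : Nat)
    (r c : Nat) (path : List (Int × Int)) (idx : Nat) :
    List (Nat × Nat × List (Int × Int) × Nat) :=
  pvDirs.filterMap (fun d =>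
    if (pvInB m n ((r : Int) + d.1) ((c : Int) + d.2) &&
        pvCellEq (pvCell matrix ((r : Int) + d.1).toNat ((c : Int) + d.2).toNat)
          (PySem.Str.pyGet? word ((idx : Int) + 1))) = true
    then some (((r : Int) + d.1).toNat, ((c : Int) + d.2).toNat,
               path ++ [((r : Int) + d.1, (c : Int) + d.2)], idx + 1)
    else none)

-- termination measure for the queue: a node at depth idx still costs 5^(len(word)-1-idx)
def pvW (L idx : Nat) : Nat := 5 ^ (L - 1 - idx)

def pvQW (L : Nat) (Q : List (Nat × Nat × List (Int × Int) × Nat)) : Nat :=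
  (Q.map (fun nd => pvW L nd.2.2.2)).sum

theorem pvQW_filterMap_le {α : Type} (L w : Nat)
    (f : α → Option (Nat × Nat × List (Int × Int) × Nat)) (l : List α)
    (h : ∀ a nd, f a = some nd → pvW L nd.2.2.2 = w) :
    pvQW L (l.filterMap f) ≤ l.length * w := by
  induction l with
  | nil => simp [pvQW]
  | cons a l ih =>
    cases hf : f a with
    | none =>
      simp only [List.filterMap_cons, hf, List.length_cons, Nat.succ_mul]
      exact le_trans ih (by omega)
    | some nd =>
      simp only [List.filterMap_cons, hf, List.length_cons, Nat.succ_mul, pvQW,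
        List.map_cons, List.sum_cons] at ih ⊢
      have := h a nd hf
      omega

theorem pvExpand_weight (matrix : List (List String)) (word : String) (m n r c : Nat)
    (path : List (Int × Int)) (idx : Nat) :
    pvQW word.toList.length (pvExpand matrix word m n r c path idx) < pvW word.toList.length idx := by
  by_cases hL : word.toList.length ≤ idx + 1
  · have hcast : ((idx : Int) + 1) = ((idx + 1 : Nat) : Int) := by push_cast; ring
    have hnone : PySem.List.pyGet? word.toList ((idx : Int) + 1) = none := by
      rw [hcast, PySem.List.pyGet?_natCast]
      exact List.getElem?_eq_none (by simpa using hL)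
    have hempty : pvExpand matrix word m n r c path idx = [] := by
      simp [pvExpand, pvCellEq, hnone]
    rw [hempty]
    simp only [pvQW, List.map_nil, List.sum_nil, pvW]
    positivity
  · have hle : pvQW word.toList.length (pvExpand matrix word m n r c path idx)
        ≤ 4 * (5 ^ (word.toList.length - 1 - (idx + 1))) := by
      have h := pvQW_filterMap_le word.toList.length (pvW word.toList.length (idx + 1))
        (fun d : Int × Int =>
          if (pvInB m n ((r : Int) + d.1) ((c : Int) + d.2) &&
              pvCellEq (pvCell matrix ((r : Int) + d.1).toNat ((c : Int) + d.2).toNat)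
                (PySem.Str.pyGet? word ((idx : Int) + 1))) = true
          then some (((r : Int) + d.1).toNat, ((c : Int) + d.2).toNat,
                     path ++ [((r : Int) + d.1, (c : Int) + d.2)], idx + 1)
          else none) pvDirs ?_
      · simpa [pvExpand, pvDirs, pvW] using h
      · intro a nd hf
        simp only at hf
        split at hf
        · cases hf; rfl
        · cases hf
    have hsplit : word.toList.length - 1 - idx = (word.toList.length - 1 - (idx + 1)) + 1 := by omega
    have hpos : 1 ≤ 5 ^ (word.toList.length - 1 - (idx + 1)) := Nat.one_le_pow _ _ (by norm_num)
    calc pvQW word.toList.length (pvExpand matrix word m n r c path idx)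
        ≤ 4 * (5 ^ (word.toList.length - 1 - (idx + 1))) := hle
      _ < 5 ^ ((word.toList.length - 1 - (idx + 1)) + 1) := by rw [pow_succ]; omega
      _ = pvW word.toList.length idx := by rw [pvW, hsplit]

-- Python's while-queue loop; the queue is popped at the head, children appended at the tail
def pvBfsLoop (matrix : List (List String)) (word : String) (m n : Nat) :
    List (Nat × Nat × List (Int × Int) × Nat) → Option (List (Int × Int))
  | [] => none
  | (r, c, path, idx) :: rest =>
      if idx = word.toList.length - 1 then some path
      else pvBfsLoop matrix word m n (rest ++ pvExpand matrix word m n r c path idx)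
  termination_by Q => pvQW word.toList.length Q
  decreasing_by
    have h := pvExpand_weight matrix word m n r c path idx
    simp only [pvQW, List.map_append, List.sum_append, List.map_cons, List.sum_cons] at h ⊢
    omega

def find_word_bfs (matrix : List (List String)) (word : String) : List (Int × Int) :=
  let m := matrix.length
  let n := (matrix.getD 0 []).length
  match (List.range m).findSome? (fun i =>
    (List.range n).findSome? (fun j =>
      if pvCellEq (pvCell matrix i j) (PySem.Str.pyGet? word 0) = true
      then pvBfsLoop matrix word m n [(i, j, [((i : Int), (j : Int))], 0)]
      else none)) with
  | some p => p
  | none => []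

-- ===== PORT B =====
def pvbDirs : List (Int × Int) := [(0, 1), (1, 0), (0, -1), (-1, 0)]

def pvbCellEq (s : String) (oc : Option Char) : Bool :=
  match oc with
  | some ch => s == String.ofList [ch]
  | none => false

def pvbInB (m n : Nat) (a b : Int) : Bool :=
  decide (0 ≤ a) && decide (a < (m : Int)) && decide (0 ≤ b) && decide (b < (n : Int))

def pvbLook (g : List (List Bool)) (i j : Nat) : Bool := (g.getD i []).getD j false

-- one reachability grid: cells carrying word[k] with a viable neighbour in nxt (if given)
def pvbGrid (matrix : List (List String)) (word : String) (m n : Nat) (k : Int)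
    (nxt : Option (List (List Bool))) : List (List Bool) :=
  (List.range m).map fun i => (List.range n).map fun j =>
    pvbCellEq ((matrix.getD i []).getD j "") (PySem.Str.pyGet? word k) &&
    (match nxt with
     | none => true
     | some g => pvbDirs.any fun d =>
         pvbInB m n ((i : Int) + d.1) ((j : Int) + d.2) &&
         pvbLook g ((i : Int) + d.1).toNat ((j : Int) + d.2).toNat)

-- tables[k][i][j] == "word[k:] can be spelled starting at (i, j)" (built back to front)
def pvbTables (matrix : List (List String)) (word : String) (m n L : Nat) :
    List (List (List Bool)) :=
  (List.range' 1 (L - 1)).foldl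
    (fun (tables : List (List (List Bool))) (k : Nat) =>
      pvbGrid matrix word m n ((L : Int) - 1 - (k : Int)) (some (tables.headD [])) :: tables)
    [pvbGrid matrix word m n ((L : Int) - 1) none]

-- greedy reconstruction: at every step the first direction that stays reachable
def pvbWalk (m n L : Nat) (tables : List (List (List Bool))) (i j : Nat) : List (Int × Int) :=
  ((List.range' 1 (L - 1)).foldl
    (fun (st : Nat × Nat × List (Int × Int)) k =>
      match pvbDirs.find? (fun d =>
          pvbInB m n ((st.1 : Int) + d.1) ((st.2.1 : Int) + d.2) &&
          pvbLook (tables.getD k []) ((st.1 : Int) + d.1).toNat ((st.2.1 : Int) + d.2).toNat) with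
      | some d => (((st.1 : Int) + d.1).toNat, ((st.2.1 : Int) + d.2).toNat,
                   st.2.2 ++ [((st.1 : Int) + d.1, (st.2.1 : Int) + d.2)])
      | none => (st.1, st.2.1, st.2.2 ++ [((st.1 : Int), (st.2.1 : Int))]))
    (i, j, [((i : Int), (j : Int))])).2.2

def find_word_bfs_alt (matrix : List (List String)) (word : String) : List (Int × Int) :=
  let m := matrix.length
  let n := (matrix.getD 0 []).length
  let L := word.toList.length
  let tables := pvbTables matrix word m n L
  match (List.range m).findSome? (fun i =>
    (List.range n).findSome? (fun j =>
      if pvbLook (tables.headD []) i j = true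
      then some (pvbWalk m n L tables i j)
      else none)) with
  | some p => p
  | none => []

-- ===== PRECONDITION & SPEC =====
-- Pre_ excludes the inputs where Python A raises IndexError (empty matrix; empty word read by a
-- scan with at least one column) and ragged matrices having a row shorter than the first row: on
-- those A may still return when its search never reads past the short row, but the natural B
-- always builds the full reachability table and raises IndexError there.
def Pre_find_word_bfs (matrix : List (List String)) (word : String) : Prop :=
  matrix ≠ [] ∧ (word ≠ "" ∨ (matrix.headD []).length = 0) ∧
  ∀ row ∈ matrix, (matrix.headD []).length ≤ row.length

instance (matrix : List (List String)) (word : String) : Decidable (Pre_find_word_bfs matrix word) := by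
  unfold Pre_find_word_bfs; infer_instance

def pvWitness_find_word_bfs : List (List String) × String := ([["a", "b"], ["c", "d"]], "ab")

def Spec_find_word_bfs (matrix : List (List String)) (word : String) (out : List (Int × Int)) : Prop := out = find_word_bfs_alt matrix word
instance (matrix : List (List String)) (word : String) (out : List (Int × Int)) : Decidable (Spec_find_word_bfs matrix word out) := by unfold Spec_find_word_bfs; infer_instance

-- ===== CLAIM (what is proved, stated in full; the proofs are below) =====
def Claim_equal_find_word_bfs : Prop := ∀ (matrix : List (List String)) (word : String), Dom_find_word_bfs matrix word → Pre_find_word_bfs matrix word → Spec_find_word_bfs matrix word (find_word_bfs matrix word)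

-- ===== LEMMAS AND PROOFS =====

-- generic list facts used to read off the first produced element of the searches

theorem pvFindSome?_congr {α β : Type} (l : List α) (f g : α → Option β)
    (h : ∀ a ∈ l, f a = g a) : l.findSome? f = l.findSome? g := by
  induction l with
  | nil => rfl
  | cons a l ih =>
    rw [List.findSome?_cons, List.findSome?_cons, h a (by simp),
      ih (fun a ha => h a (by simp [ha]))]

theorem pvFind?_congr {α : Type} (l : List α) (p q : α → Bool)
    (h : ∀ a ∈ l, p a = q a) : l.find? p = l.find? q := by
  induction l with
  | nil => rfl
  | cons a l ih =>
    rw [List.find?_cons, List.find?_cons, h a (by simp),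
      ih (fun a ha => h a (by simp [ha]))]

theorem pvFindSome?_none {α β : Type} (l : List α) :
    l.findSome? (fun _ => (none : Option β)) = none := by
  induction l with
  | nil => rfl
  | cons a l ih => rw [List.findSome?_cons]; exact ih

theorem pvFindSome?_flatMap {α β γ : Type} (l : List α) (g : α → List β) (f : β → Option γ) :
    (l.flatMap g).findSome? f = l.findSome? (fun a => (g a).findSome? f) := by
  induction l with
  | nil => rfl
  | cons a l ih =>
    rw [List.flatMap_cons, List.findSome?_append, ih, List.findSome?_cons]
    cases (g a).findSome? f <;> rfl

theorem pvFindSome?_filterMap {α β γ : Type} (l : List α) (g : α → Option β) (f : β → Option γ) :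
    (l.filterMap g).findSome? f = l.findSome? (fun a => (g a).bind f) := by
  induction l with
  | nil => rfl
  | cons a l ih =>
    cases hg : g a <;> simp [hg, List.findSome?_cons, ih]

theorem pvFindSome?_guard {α β : Type} (l : List α) (p : α → Bool) (f : α → β) :
    l.findSome? (fun a => if p a = true then some (f a) else none) = (l.find? p).map f := by
  induction l with
  | nil => rfl
  | cons a l ih =>
    by_cases h : p a
    · simp [h]
    · simp [h, ih]

-- the specification objects: reachability and the greedy continuation

-- pvCanT t k i j  =  "word[k:k+t+1] can be spelled starting at cell (i, j)"
def pvCanT (matrix : List (List String)) (word : String) (m n : Nat) :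
    Nat → Nat → Nat → Nat → Bool
  | 0, k, i, j => pvCellEq (pvCell matrix i j) (PySem.Str.pyGet? word (k : Int))
  | t + 1, k, i, j =>
      pvCellEq (pvCell matrix i j) (PySem.Str.pyGet? word (k : Int)) &&
      pvDirs.any (fun d => pvInB m n ((i : Int) + d.1) ((j : Int) + d.2) &&
        pvCanT matrix word m n t (k + 1) ((i : Int) + d.1).toNat ((j : Int) + d.2).toNat)

-- the greedy (lexicographically first viable) continuation after cell (i, j)
def pvGT (matrix : List (List String)) (word : String) (m n : Nat) :
    Nat → Nat → Nat → Nat → List (Int × Int)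
  | 0, _, _, _ => []
  | t + 1, k, i, j =>
      match pvDirs.find? (fun d => pvInB m n ((i : Int) + d.1) ((j : Int) + d.2) &&
          pvCanT matrix word m n t (k + 1) ((i : Int) + d.1).toNat ((j : Int) + d.2).toNat) with
      | some d => ((i : Int) + d.1, (j : Int) + d.2) ::
          pvGT matrix word m n t (k + 1) ((i : Int) + d.1).toNat ((j : Int) + d.2).toNat
      | none => []

theorem pvCanT_cell (matrix : List (List String)) (word : String) (m n t k i j : Nat)
    (h : pvCanT matrix word m n t k i j = true) :
    pvCellEq (pvCell matrix i j) (PySem.Str.pyGet? word (k : Int)) = true := by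
  cases t <;> simp [pvCanT] at h ⊢ <;> tauto

-- ===== the A side: the BFS returns the greedy path of the first viable start =====

theorem pvBfs_pernode (matrix : List (List String)) (word : String) (m n t k r c : Nat)
    (path : List (Int × Int))
    (hcell : pvCellEq (pvCell matrix r c) (PySem.Str.pyGet? word (k : Int)) = true) :
    (pvExpand matrix word m n r c path k).findSome?
        (fun nd => if pvCanT matrix word m n t (k + 1) nd.1 nd.2.1 = true
          then some (nd.2.2.1 ++ pvGT matrix word m n t (k + 1) nd.1 nd.2.1) else none)
    = (if pvCanT matrix word m n (t + 1) k r c = true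
        then some (path ++ pvGT matrix word m n (t + 1) k r c) else none) := by
  have hc : ((k : Int) + 1) = ((k + 1 : Nat) : Int) := by push_cast; ring
  have hmid : (pvExpand matrix word m n r c path k).findSome?
      (fun nd => if pvCanT matrix word m n t (k + 1) nd.1 nd.2.1 = true
        then some (nd.2.2.1 ++ pvGT matrix word m n t (k + 1) nd.1 nd.2.1) else none)
      = (pvDirs.find? (fun d => pvInB m n ((r : Int) + d.1) ((c : Int) + d.2) &&
          pvCanT matrix word m n t (k + 1) ((r : Int) + d.1).toNat ((c : Int) + d.2).toNat)).map
          (fun d => path ++ ((r : Int) + d.1, (c : Int) + d.2) ::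
            pvGT matrix word m n t (k + 1) ((r : Int) + d.1).toNat ((c : Int) + d.2).toNat) := by
    rw [pvExpand, pvFindSome?_filterMap, ← pvFindSome?_guard]
    apply pvFindSome?_congr
    intro d _
    by_cases hb : pvInB m n ((r : Int) + d.1) ((c : Int) + d.2) = true
    · by_cases hm : pvCellEq (pvCell matrix ((r : Int) + d.1).toNat ((c : Int) + d.2).toNat)
          (PySem.List.pyGet? word.toList ((k : Int) + 1)) = true
      · by_cases ht : pvCanT matrix word m n t (k + 1) ((r : Int) + d.1).toNat ((c : Int) + d.2).toNat = true
        · simp [hb, hm, ht]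
        · simp [hb, hm, ht]
      · have ht : pvCanT matrix word m n t (k + 1) ((r : Int) + d.1).toNat ((c : Int) + d.2).toNat = false := by
          cases hcl : pvCanT matrix word m n t (k + 1) ((r : Int) + d.1).toNat ((c : Int) + d.2).toNat
          · rfl
          · exfalso
            have hcm := pvCanT_cell matrix word m n t (k + 1) _ _ hcl
            rw [← hc] at hcm
            exact hm (by simpa using hcm)
        simp [hb, hm, ht]
    · simp [hb]
  rw [hmid]
  cases hfind : pvDirs.find? (fun d => pvInB m n ((r : Int) + d.1) ((c : Int) + d.2) &&
      pvCanT matrix word m n t (k + 1) ((r : Int) + d.1).toNat ((c : Int) + d.2).toNat) with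
  | none =>
    have hany : pvDirs.any (fun d => pvInB m n ((r : Int) + d.1) ((c : Int) + d.2) &&
        pvCanT matrix word m n t (k + 1) ((r : Int) + d.1).toNat ((c : Int) + d.2).toNat) = false := by
      rw [List.any_eq_false]
      intro d hd
      simpa using List.find?_eq_none.mp hfind d hd
    have hcanf : pvCanT matrix word m n (t + 1) k r c = false := by
      simp [pvCanT, hany]
    simp [hcanf]
  | some d =>
    have hPd := List.find?_some hfind
    have hmem := List.mem_of_find?_eq_some hfind
    have hany : pvDirs.any (fun d => pvInB m n ((r : Int) + d.1) ((c : Int) + d.2) &&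
        pvCanT matrix word m n t (k + 1) ((r : Int) + d.1).toNat ((c : Int) + d.2).toNat) = true :=
      List.any_eq_true.mpr ⟨d, hmem, hPd⟩
    have hcan : pvCanT matrix word m n (t + 1) k r c = true := by
      have hcell' : pvCellEq (pvCell matrix r c) word.toList[k]? = true := by
        simpa using hcell
      simp [pvCanT, hcell', hany]
    simp [hcan, pvGT, hfind]

theorem pvBfs_drain (matrix : List (List String)) (word : String) (m n k : Nat)
    (hk : k ≠ word.toList.length - 1) :
    ∀ (X Y : List (Nat × Nat × List (Int × Int) × Nat)),
      (∀ nd ∈ X, nd.2.2.2 = k) →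
      pvBfsLoop matrix word m n (X ++ Y) =
        pvBfsLoop matrix word m n
          (Y ++ X.flatMap (fun nd => pvExpand matrix word m n nd.1 nd.2.1 nd.2.2.1 nd.2.2.2)) := by
  intro X
  induction X with
  | nil => intro Y _; simp
  | cons nd X' ih =>
    intro Y hX
    obtain ⟨r, c, path, idx⟩ := nd
    have hidx : idx = k := hX (r, c, path, idx) (by simp)
    subst hidx
    rw [List.cons_append, pvBfsLoop, if_neg hk]
    rw [List.append_assoc]
    rw [ih (Y ++ pvExpand matrix word m n r c path idx) (fun nd h => hX nd (by simp [h]))]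
    simp [List.flatMap_cons, List.append_assoc]

theorem pvBfs_level (matrix : List (List String)) (word : String) (m n : Nat) :
    ∀ (t k : Nat) (Q : List (Nat × Nat × List (Int × Int) × Nat)),
      k + t + 1 = word.toList.length →
      (∀ nd ∈ Q, nd.2.2.2 = k ∧
        pvCellEq (pvCell matrix nd.1 nd.2.1) (PySem.Str.pyGet? word (k : Int)) = true) →
      pvBfsLoop matrix word m n Q =
        Q.findSome? (fun nd => if pvCanT matrix word m n t k nd.1 nd.2.1 = true
          then some (nd.2.2.1 ++ pvGT matrix word m n t k nd.1 nd.2.1) else none) := by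
  intro t
  induction t with
  | zero =>
    intro k Q hk hQ
    cases Q with
    | nil => rw [pvBfsLoop]; rfl
    | cons nd rest =>
      obtain ⟨r, c, path, idx⟩ := nd
      obtain ⟨hidx, hcell⟩ := hQ (r, c, path, idx) (by simp)
      simp only at hidx hcell
      subst hidx
      rw [pvBfsLoop, if_pos (by omega)]
      have hcell' : pvCellEq (pvCell matrix r c) word.toList[idx]? = true := by simpa using hcell
      simp [pvCanT, hcell', pvGT]
  | succ t ih =>
    intro k Q hk hQ
    have hkne : k ≠ word.toList.length - 1 := by omega
    have hdrain := pvBfs_drain matrix word m n k hkne Q [] (fun nd h => (hQ nd h).1)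
    rw [List.append_nil, List.nil_append] at hdrain
    rw [hdrain]
    have hc : ((k : Int) + 1) = ((k + 1 : Nat) : Int) := by push_cast; ring
    have hE : ∀ nd ∈ Q.flatMap (fun nd => pvExpand matrix word m n nd.1 nd.2.1 nd.2.2.1 nd.2.2.2),
        nd.2.2.2 = k + 1 ∧
        pvCellEq (pvCell matrix nd.1 nd.2.1) (PySem.Str.pyGet? word ((k + 1 : Nat) : Int)) = true := by
      intro nd hnd
      rw [List.mem_flatMap] at hnd
      obtain ⟨q, hq, hmem⟩ := hnd
      have hqidx : q.2.2.2 = k := (hQ q hq).1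
      rw [hqidx] at hmem
      rw [pvExpand, List.mem_filterMap] at hmem
      obtain ⟨d, _, hd⟩ := hmem
      split at hd
      · rename_i hguard
        cases hd
        refine ⟨rfl, ?_⟩
        simp only [Bool.and_eq_true] at hguard
        have := hguard.2
        rw [hc] at this
        exact this
      · cases hd
    rw [ih (k + 1) _ (by omega) hE]
    rw [pvFindSome?_flatMap]
    apply pvFindSome?_congr
    intro nd hnd
    obtain ⟨r, c, path, idx⟩ := nd
    obtain ⟨hidx, hcell⟩ := hQ _ hnd
    simp only at hidx hcell
    subst hidx
    exact pvBfs_pernode matrix word m n t idx r c path hcell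

-- ===== the B side: the tables are reachability, the walk is the greedy continuation =====

def pvSpecGrid (matrix : List (List String)) (word : String) (m n L k : Nat) :
    List (List Bool) :=
  (List.range m).map fun i => (List.range n).map fun j =>
    pvCanT matrix word m n (L - 1 - k) k i j

theorem pvLook_specGrid (matrix : List (List String)) (word : String) (m n L k i j : Nat)
    (hi : i < m) (hj : j < n) :
    pvbLook (pvSpecGrid matrix word m n L k) i j = pvCanT matrix word m n (L - 1 - k) k i j := by
  rw [pvbLook, pvSpecGrid, PySem.List.getD_map_range _ _ _ _ hi,
    PySem.List.getD_map_range _ _ _ _ hj]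

theorem pvLook_specGrid' (matrix : List (List String)) (word : String) (m n L k : Nat) (a b : Int)
    (hb : pvInB m n a b = true) :
    pvbLook (pvSpecGrid matrix word m n L k) a.toNat b.toNat =
      pvCanT matrix word m n (L - 1 - k) k a.toNat b.toNat := by
  simp only [pvInB, Bool.and_eq_true, decide_eq_true_eq] at hb
  exact pvLook_specGrid matrix word m n L k a.toNat b.toNat (by omega) (by omega)

theorem pvGrid_base (matrix : List (List String)) (word : String) (m n L : Nat) (hL : 1 ≤ L) :
    pvbGrid matrix word m n ((L : Int) - 1) none = pvSpecGrid matrix word m n L (L - 1) := by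
  rw [pvbGrid, pvSpecGrid]
  apply List.map_congr_left
  intro i _
  apply List.map_congr_left
  intro j _
  have hcast : ((L : Int) - 1) = ((L - 1 : Nat) : Int) := by omega
  have hfuel : L - 1 - (L - 1) = 0 := by omega
  rw [hcast, hfuel]
  simp only [pvCanT, Bool.and_true]
  rfl

theorem pvGrid_step (matrix : List (List String)) (word : String) (m n L k : Nat)
    (hk1 : 1 ≤ k) (hk2 : k ≤ L - 1) (hL : 1 ≤ L) :
    pvbGrid matrix word m n ((L : Int) - 1 - (k : Int)) (some (pvSpecGrid matrix word m n L (L - k)))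
      = pvSpecGrid matrix word m n L (L - 1 - k) := by
  obtain ⟨k', rfl⟩ : ∃ k', k = k' + 1 := ⟨k - 1, by omega⟩
  rw [pvbGrid]
  conv_rhs => rw [pvSpecGrid]
  apply List.map_congr_left
  intro i _
  apply List.map_congr_left
  intro j _
  have hfuel : L - 1 - (L - 1 - (k' + 1)) = k' + 1 := by omega
  have hcast : (L : Int) - 1 - ((k' + 1 : Nat) : Int) = ((L - 1 - (k' + 1) : Nat) : Int) := by
    push_cast; omega
  rw [hfuel, hcast]
  simp only [pvCanT]
  congr 1
  apply List.any_congr rfl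
  intro d
  by_cases hb : pvInB m n ((i : Int) + d.1) ((j : Int) + d.2) = true
  · have hb' : pvbInB m n ((i : Int) + d.1) ((j : Int) + d.2) = true := hb
    rw [hb', hb, Bool.true_and, Bool.true_and]
    have hlk := pvLook_specGrid' matrix word m n L (L - (k' + 1))
      ((i : Int) + d.1) ((j : Int) + d.2) hb
    rw [hlk]
    have h1 : L - 1 - (L - (k' + 1)) = k' := by omega
    have h2 : L - (k' + 1) = L - 1 - (k' + 1) + 1 := by omega
    rw [h1, h2]
  · rw [Bool.not_eq_true] at hb
    have hb' : pvbInB m n ((i : Int) + d.1) ((j : Int) + d.2) = false := hb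
    rw [hb', hb, Bool.false_and, Bool.false_and]

theorem pvTables_spec (matrix : List (List String)) (word : String) (m n L : Nat) (hL : 1 ≤ L) :
    pvbTables matrix word m n L = (List.range L).map (pvSpecGrid matrix word m n L) := by
  rw [pvbTables]
  have fold : ∀ (c j : Nat) (acc : List (List (List Bool))),
      j + c = L - 1 →
      acc = (List.range' (L - 1 - j) (j + 1)).map (pvSpecGrid matrix word m n L) →
      (List.range' (j + 1) c).foldl
        (fun (tables : List (List (List Bool))) (k : Nat) =>
          pvbGrid matrix word m n ((L : Int) - 1 - (k : Int)) (some (tables.headD [])) :: tables) acc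
      = (List.range L).map (pvSpecGrid matrix word m n L) := by
    intro c
    induction c with
    | zero =>
      intro j acc hj hacc
      have h1 : L - 1 - j = 0 := by omega
      have h2 : j + 1 = L := by omega
      rw [hacc, h1, h2, List.range_eq_range']
      rfl
    | succ c ihc =>
      intro j acc hj hacc
      rw [List.range'_succ, List.foldl_cons]
      have hhead : acc.headD [] = pvSpecGrid matrix word m n L (L - 1 - j) := by
        rw [hacc, List.range'_succ]
        rfl
      rw [hhead]
      have hstep := pvGrid_step matrix word m n L (j + 1) (by omega) (by omega) hL
      have hLj : L - (j + 1) = L - 1 - j := by omega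
      rw [hLj] at hstep
      rw [hstep]
      apply ihc (j + 1) _ (by omega)
      have h3 : L - 1 - j = (L - 1 - (j + 1)) + 1 := by omega
      conv_rhs => rw [List.range'_succ]
      rw [List.map_cons, ← h3, ← hacc]
  refine fold (L - 1) 0 _ (by omega) ?_
  rw [pvGrid_base matrix word m n L hL]
  have : List.range' (L - 1 - 0) (0 + 1) = [L - 1] := by simp
  rw [this]
  rfl

theorem pvWalk_gen (matrix : List (List String)) (word : String) (m n L : Nat) :
    ∀ (cnt s r c : Nat) (path : List (Int × Int)),
      s + cnt = L - 1 →
      pvCanT matrix word m n cnt s r c = true →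
      ((List.range' (s + 1) cnt).foldl
        (fun (st : Nat × Nat × List (Int × Int)) k =>
          match pvbDirs.find? (fun d =>
              pvbInB m n ((st.1 : Int) + d.1) ((st.2.1 : Int) + d.2) &&
              pvbLook ((((List.range L).map (pvSpecGrid matrix word m n L))).getD k [])
                ((st.1 : Int) + d.1).toNat ((st.2.1 : Int) + d.2).toNat) with
          | some d => (((st.1 : Int) + d.1).toNat, ((st.2.1 : Int) + d.2).toNat,
                       st.2.2 ++ [((st.1 : Int) + d.1, (st.2.1 : Int) + d.2)])
          | none => (st.1, st.2.1, st.2.2 ++ [((st.1 : Int), (st.2.1 : Int))]))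
        (r, c, path)).2.2
      = path ++ pvGT matrix word m n cnt s r c := by
  intro cnt
  induction cnt with
  | zero => intro s r c path _ _; simp [pvGT]
  | succ cnt ih =>
    intro s r c path hs hcan
    rw [List.range'_succ, List.foldl_cons]
    dsimp only
    have htab : (((List.range L).map (pvSpecGrid matrix word m n L))).getD (s + 1) []
        = pvSpecGrid matrix word m n L (s + 1) :=
      PySem.List.getD_map_range _ _ _ _ (by omega)
    rw [htab]
    have hfuel : L - 1 - (s + 1) = cnt := by omega
    have hpred : ∀ d ∈ pvbDirs,
        (pvbInB m n ((r : Int) + d.1) ((c : Int) + d.2) &&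
          pvbLook (pvSpecGrid matrix word m n L (s + 1))
            ((r : Int) + d.1).toNat ((c : Int) + d.2).toNat)
        = (pvInB m n ((r : Int) + d.1) ((c : Int) + d.2) &&
           pvCanT matrix word m n cnt (s + 1) ((r : Int) + d.1).toNat ((c : Int) + d.2).toNat) := by
      intro d _
      by_cases hb : pvInB m n ((r : Int) + d.1) ((c : Int) + d.2) = true
      · have hb' : pvbInB m n ((r : Int) + d.1) ((c : Int) + d.2) = true := hb
        rw [hb', hb, Bool.true_and, Bool.true_and,
          pvLook_specGrid' matrix word m n L (s + 1) _ _ hb, hfuel]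
      · rw [Bool.not_eq_true] at hb
        have hb' : pvbInB m n ((r : Int) + d.1) ((c : Int) + d.2) = false := hb
        rw [hb', hb, Bool.false_and, Bool.false_and]
    have hsc : pvbDirs.find? (fun d =>
          pvbInB m n ((r : Int) + d.1) ((c : Int) + d.2) &&
          pvbLook (pvSpecGrid matrix word m n L (s + 1))
            ((r : Int) + d.1).toNat ((c : Int) + d.2).toNat)
        = pvDirs.find? (fun d =>
          pvInB m n ((r : Int) + d.1) ((c : Int) + d.2) &&
          pvCanT matrix word m n cnt (s + 1) ((r : Int) + d.1).toNat ((c : Int) + d.2).toNat) := by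
      rw [pvFind?_congr pvbDirs _ _ hpred]
      rfl
    rw [hsc]
    simp only [pvCanT, Bool.and_eq_true] at hcan
    obtain ⟨-, hany⟩ := hcan
    cases hfind : pvDirs.find? (fun d => pvInB m n ((r : Int) + d.1) ((c : Int) + d.2) &&
        pvCanT matrix word m n cnt (s + 1) ((r : Int) + d.1).toNat ((c : Int) + d.2).toNat) with
    | none =>
      exfalso
      rw [List.any_eq_true] at hany
      obtain ⟨d, hd, hq⟩ := hany
      exact absurd hq (by simpa using List.find?_eq_none.mp hfind d hd)
    | some d =>
      have hq := List.find?_some hfind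
      simp only [Bool.and_eq_true] at hq
      obtain ⟨hinb, hcant⟩ := hq
      dsimp only
      rw [ih (s + 1) ((r : Int) + d.1).toNat ((c : Int) + d.2).toNat
        (path ++ [((r : Int) + d.1, (c : Int) + d.2)]) (by omega) hcant]
      rw [pvGT, hfind]
      simp

-- ===== VERDICT (by name: the statement is the Claim_ definition above) =====
theorem find_word_bfs_spec : Claim_equal_find_word_bfs := by
  unfold Claim_equal_find_word_bfs
  intro matrix word _ hpre
  unfold Spec_find_word_bfs
  obtain ⟨-, hwn, -⟩ := hpre
  by_cases hw : word = ""
  · subst hw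
    have hn : (matrix.getD 0 []).length = 0 := by
      rcases hwn with h | h
      · exact absurd rfl h
      · cases matrix with
        | nil => rfl
        | cons a t => simpa using h
    have hn' : (matrix[0]?.getD []).length = 0 := by simpa using hn
    simp [find_word_bfs, find_word_bfs_alt, hn', pvFindSome?_none]
  · have hL : 1 ≤ word.toList.length := by
      have hne : word.toList ≠ [] := fun h => hw (by have h2 := congrArg String.ofList h; simpa using h2)
      cases h : word.toList with
      | nil => exact absurd h hne
      | cons a t => simp
    rw [find_word_bfs, find_word_bfs_alt]
    rw [pvTables_spec matrix word matrix.length (matrix.getD 0 []).length word.toList.length hL]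
    have hhead : (((List.range word.toList.length).map
        (pvSpecGrid matrix word matrix.length (matrix.getD 0 []).length word.toList.length))).headD []
        = pvSpecGrid matrix word matrix.length (matrix.getD 0 []).length word.toList.length 0 := by
      obtain ⟨l, hl⟩ : ∃ l, word.toList.length = l + 1 := ⟨word.toList.length - 1, by omega⟩
      rw [hl, List.range_eq_range', List.range'_succ, List.map_cons]
      rfl
    rw [hhead]
    congr 1
    apply pvFindSome?_congr
    intro i hi
    apply pvFindSome?_congr
    intro j hj
    have hi' : i < matrix.length := List.mem_range.mp hi
    have hj' : j < (matrix.getD 0 []).length := List.mem_range.mp hj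
    rw [pvLook_specGrid matrix word matrix.length (matrix.getD 0 []).length
      word.toList.length 0 i j hi' hj']
    simp only [Nat.sub_zero]
    by_cases hcell : pvCellEq (pvCell matrix i j) (PySem.Str.pyGet? word 0) = true
    · rw [if_pos hcell]
      have hlev := pvBfs_level matrix word matrix.length (matrix.getD 0 []).length
        (word.toList.length - 1) 0 [(i, j, [((i : Int), (j : Int))], 0)] (by omega)
        (by
          intro nd hnd
          simp only [List.mem_singleton] at hnd
          subst hnd
          exact ⟨rfl, by simpa using hcell⟩)
      rw [hlev, List.findSome?_cons]
      by_cases hcan : pvCanT matrix word matrix.length (matrix.getD 0 []).length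
          (word.toList.length - 1) 0 i j = true
      · have hwalk := pvWalk_gen matrix word matrix.length (matrix.getD 0 []).length
          word.toList.length (word.toList.length - 1) 0 i j [((i : Int), (j : Int))]
          (by omega) hcan
        simp only [Nat.zero_add] at hwalk
        rw [if_pos hcan, if_pos hcan, pvbWalk, hwalk]
      · rw [if_neg hcan, if_neg hcan]
        rfl
    · rw [if_neg hcell]
      have hcf : pvCanT matrix word matrix.length (matrix.getD 0 []).length
          (word.toList.length - 1) 0 i j = false := by
        cases h : pvCanT matrix word matrix.length (matrix.getD 0 []).length
            (word.toList.length - 1) 0 i j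
        · rfl
        · exfalso
          have hcm := pvCanT_cell matrix word matrix.length (matrix.getD 0 []).length
            (word.toList.length - 1) 0 i j h
          exact hcell (by simpa using hcm)
      exact (if_neg (by simpa using hcf)).symm
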